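-- pv_equiv track=rewrite | github.com/maybethetricker/FirmRD | use_define/utils.py | get_mem_string
-- ===== SOURCE A (Python) =====
-- ALLOWED_CHARS = '0123456789abcdefghijklmnopqrstuvwxyzABCDEFGHIJKLMNOPQRSTUVWXYZ-/_'
--
-- EXTENDED_ALLOWED_CHARS = ALLOWED_CHARS + "%,.;+=_)(*&^%$#@!~`?|<>{}[] \""
--
-- def get_mem_string(mem_bytes, extended=False):
--     """
--     Return the set of consecutive ASCII characters within a list of bytes
--
--     :param mem_bytes: list of bytes
--     :param extended: use extended list of characters
--     :return: the longest string found
--     """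
--
--     tmp = ''
--     chars = EXTENDED_ALLOWED_CHARS if extended else ALLOWED_CHARS
--     for c in mem_bytes:
--         c_ascii = chr(c)
--         if c_ascii not in chars:
--             break
--         tmp += c_ascii
--     return tmp
-- ===== SOURCE B (Python) =====
-- ALLOWED_CHARS = '0123456789abcdefghijklmnopqrstuvwxyzABCDEFGHIJKLMNOPQRSTUVWXYZ-/_'
--
-- EXTENDED_ALLOWED_CHARS = ALLOWED_CHARS + "%,.;+=_)(*&^%$#@!~`?|<>{}[] \""
--
-- def get_mem_string(mem_bytes, extended=False):
--     chars = EXTENDED_ALLOWED_CHARS if extended else ALLOWED_CHARS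
--     cut = next((i for i, c in enumerate(mem_bytes) if chr(c) not in chars),
--                len(mem_bytes))
--     return ''.join(map(chr, mem_bytes[:cut]))
-- ===== Notes on version B (the rewrite author's own statement) =====
-- stated objective: idiomatic
-- what changed: B first finds the cut index (first byte whose character is not allowed) with a short-circuiting generator + next, then builds the whole prefix at once with ''.join(map(chr, ...)), instead of A's accumulate-a-string-with-break loop.
import Mathlib
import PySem

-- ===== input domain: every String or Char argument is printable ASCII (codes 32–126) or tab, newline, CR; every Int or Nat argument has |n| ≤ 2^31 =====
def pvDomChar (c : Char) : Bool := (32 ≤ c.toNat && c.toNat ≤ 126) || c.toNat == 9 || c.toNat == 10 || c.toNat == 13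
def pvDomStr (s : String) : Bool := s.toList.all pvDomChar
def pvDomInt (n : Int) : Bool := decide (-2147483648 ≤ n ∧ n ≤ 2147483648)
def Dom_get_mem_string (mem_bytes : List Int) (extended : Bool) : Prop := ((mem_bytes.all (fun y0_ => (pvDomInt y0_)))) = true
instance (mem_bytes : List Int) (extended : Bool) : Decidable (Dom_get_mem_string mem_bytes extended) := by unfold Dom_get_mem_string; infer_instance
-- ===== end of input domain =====

-- B finds the cut index first and then builds the whole prefix at once (join of a map),
-- instead of A's accumulate-a-string-with-break loop; same О(n) cost, more idiomatic.

-- shared constants / primitives (transcribed module constants; chr on an in-range code)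
def pvAllowedChars : List Char :=
  "0123456789abcdefghijklmnopqrstuvwxyzABCDEFGHIJKLMNOPQRSTUVWXYZ-/_".toList
def pvExtendedAllowedChars : List Char :=
  pvAllowedChars ++ "%,.;+=_)(*&^%$#@!~`?|<>{}[] \"".toList
def pvChars (extended : Bool) : List Char :=
  if extended then pvExtendedAllowedChars else pvAllowedChars
-- chr(c): exact for 0 ≤ c < 0x110000 and non-surrogate; for other codes Python raises
-- (excluded by Pre_) or yields a surrogate, never an allowed ASCII char — membership stays false.
def pvChr (c : Int) : Char := Char.ofNat c.toNat
def pvInRange (c : Int) : Bool := decide (0 ≤ c ∧ c < 1114112)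

-- ===== PORT A =====
-- the for-loop with break, accumulating tmp
def goA (chars : List Char) : List Int → List Char → List Char
  | [], tmp => tmp
  | c :: rest, tmp =>
    let c_ascii := pvChr c
    if !(chars.contains c_ascii) then tmp
    else goA chars rest (tmp ++ [c_ascii])

def get_mem_string (mem_bytes : List Int) (extended : Bool) : String :=
  String.mk (goA (pvChars extended) mem_bytes [])

-- ===== PORT B =====
-- find the cut index (first disallowed byte, defaulting to the length), then join the prefix
def get_mem_string_alt (mem_bytes : List Int) (extended : Bool) : String :=
  let chars := pvChars extended
  let cut := mem_bytes.findIdx (fun c => !(chars.contains (pvChr c)))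
  String.mk ((mem_bytes.take cut).map pvChr)

-- ===== PRECONDITION & SPEC =====
-- Pre_ excludes exactly the inputs on which Python A raises (ValueError from chr): an
-- out-of-range byte reached before any in-range disallowed byte stops the scan.
def Pre_get_mem_string (mem_bytes : List Int) (extended : Bool) : Prop :=
  ∀ i < mem_bytes.length, pvInRange (mem_bytes.getD i 0) = false →
    ∃ j < i, pvInRange (mem_bytes.getD j 0) = true ∧
      (pvChars extended).contains (pvChr (mem_bytes.getD j 0)) = false
instance (mem_bytes : List Int) (extended : Bool) : Decidable (Pre_get_mem_string mem_bytes extended) := by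
  unfold Pre_get_mem_string; infer_instance
def pvWitness_get_mem_string : List Int × Bool := ([104, 105, 33], false)

def Spec_get_mem_string (mem_bytes : List Int) (extended : Bool) (out : String) : Prop := out = get_mem_string_alt mem_bytes extended
instance (mem_bytes : List Int) (extended : Bool) (out : String) : Decidable (Spec_get_mem_string mem_bytes extended out) := by unfold Spec_get_mem_string; infer_instance

-- ===== CLAIM (what is proved, stated in full; the proofs are below) =====
def Claim_equal_get_mem_string : Prop := ∀ (mem_bytes : List Int) (extended : Bool), Dom_get_mem_string mem_bytes extended → Pre_get_mem_string mem_bytes extended → Spec_get_mem_string mem_bytes extended (get_mem_string mem_bytes extended)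

-- ===== LEMMAS AND PROOFS =====
theorem goA_eq (chars : List Char) (l : List Int) (acc : List Char) :
    goA chars l acc =
      acc ++ ((l.take (l.findIdx (fun c => !(chars.contains (pvChr c))))).map pvChr) := by
  induction l generalizing acc with
  | nil => simp [goA]
  | cons c rest ih =>
    by_cases h : pvChr c ∈ chars
    · simp [goA, h, List.findIdx_cons, ih]
    · simp [goA, h, List.findIdx_cons]

-- ===== VERDICT (by name: the statement is the Claim_ definition above) =====
theorem get_mem_string_spec : Claim_equal_get_mem_string := by
  intro mem_bytes extended _ _
  unfold Spec_get_mem_string get_mem_string get_mem_string_alt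
  rw [goA_eq]
  simp
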